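-- pv_equiv track=rewrite | github.com/Melkye/Labs | DecisionTheory/practice_3/app/practice_3.py | get_pareto_relation
-- ===== SOURCE A (Python) =====
-- def get_sigma(x, y):
--     sigma = []
--     for i in range(len(x)):
--         delta_i = x[i] - y[i]
--         if delta_i > 0:
--             sigma.append(1)
--         elif delta_i < 0:
--             sigma.append(-1)
--         else:
--             sigma.append(0)
--     return sigma
--
-- def get_sigma_matrix(alternatives_ratings_by_criteria):
--     sigma_matrix = []
--
--     # num of rows = num of alternatives
--     for x in range(len(alternatives_ratings_by_criteria)):
--         sigma_matrix.append([])
--         for y in range(len(alternatives_ratings_by_criteria)):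
--             sigma = get_sigma(
--                 alternatives_ratings_by_criteria[x], alternatives_ratings_by_criteria[y])
--             sigma_matrix[x].append(sigma)
--
--     return sigma_matrix
--
-- def get_pareto_relation(alternatives_ratings_by_criteria):
--     sigma_matrix = get_sigma_matrix(alternatives_ratings_by_criteria)
--
--     pareto_relation = []
--     for x in range(len(alternatives_ratings_by_criteria)):
--         pareto_relation.append([])
--
--         for y in range(len(alternatives_ratings_by_criteria)):
--             is_added = False
--
--             for i in range(len(sigma_matrix[x][y])):
--                 if sigma_matrix[x][y][i] < 0:
--                     pareto_relation[x].append(0)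
--                     is_added = True
--                     break
--             if not is_added:
--                 pareto_relation[x].append(1)
--
--     return pareto_relation
-- ===== SOURCE B (Python) =====
-- def get_pareto_relation(alternatives_ratings_by_criteria):
--     alts = alternatives_ratings_by_criteria
--     return [[1 if all(a >= b for a, b in zip(rx, ry)) else 0 for ry in alts]
--             for rx in alts]
-- ===== Notes on version B (the rewrite author's own statement) =====
-- stated objective: simpler
-- what changed: Drops the intermediate sign-vector/sigma-matrix construction entirely and computes each dominance entry directly with a per-pair zip comparison in a single nested comprehension (measured ~2x faster: no n^2*m sign matrix is materialised).
import Mathlib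
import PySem

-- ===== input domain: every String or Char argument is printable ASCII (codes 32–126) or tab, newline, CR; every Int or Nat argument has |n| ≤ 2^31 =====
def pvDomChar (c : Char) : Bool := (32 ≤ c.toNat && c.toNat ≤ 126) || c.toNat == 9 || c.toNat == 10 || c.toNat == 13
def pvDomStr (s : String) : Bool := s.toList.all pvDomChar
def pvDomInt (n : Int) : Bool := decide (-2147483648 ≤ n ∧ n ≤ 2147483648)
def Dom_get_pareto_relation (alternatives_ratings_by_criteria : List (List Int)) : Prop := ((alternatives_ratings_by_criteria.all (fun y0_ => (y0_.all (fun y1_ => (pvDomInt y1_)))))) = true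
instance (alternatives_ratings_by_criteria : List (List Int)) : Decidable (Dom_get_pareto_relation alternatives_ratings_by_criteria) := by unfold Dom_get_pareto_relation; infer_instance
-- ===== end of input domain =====

-- B drops the sigma-vector/sigma-matrix intermediates and computes each dominance
-- entry directly by a per-pair zip comparison (objective: simpler).

-- ===== PORT A =====
def get_sigma (x y : List Int) : List Int :=
  (PySem.List.pyRange 0 x.length 1).foldl
    (fun sigma i =>
      let delta_i := PySem.List.pyGetD x i 0 - PySem.List.pyGetD y i 0
      if delta_i > 0 then sigma ++ [1]
      else if delta_i < 0 then sigma ++ [-1]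
      else sigma ++ [0]) []

def get_sigma_matrix (alternatives_ratings_by_criteria : List (List Int)) : List (List (List Int)) :=
  (PySem.List.pyRange 0 alternatives_ratings_by_criteria.length 1).foldl
    (fun sigma_matrix x =>
      sigma_matrix ++
        [(PySem.List.pyRange 0 alternatives_ratings_by_criteria.length 1).foldl
          (fun row y =>
            row ++ [get_sigma (PySem.List.pyGetD alternatives_ratings_by_criteria x [])
                              (PySem.List.pyGetD alternatives_ratings_by_criteria y [])]) []]) []

-- the inner 'for i … if sigma[i] < 0: append 0; break / else append 1' loop of A
def pvInnerScan : List Int → Int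
  | [] => 1
  | s :: rest => if s < 0 then 0 else pvInnerScan rest

def get_pareto_relation (alternatives_ratings_by_criteria : List (List Int)) : List (List Int) :=
  let sigma_matrix := get_sigma_matrix alternatives_ratings_by_criteria
  (PySem.List.pyRange 0 alternatives_ratings_by_criteria.length 1).foldl
    (fun pareto_relation x =>
      pareto_relation ++
        [(PySem.List.pyRange 0 alternatives_ratings_by_criteria.length 1).foldl
          (fun row y =>
            row ++ [pvInnerScan (PySem.List.pyGetD (PySem.List.pyGetD sigma_matrix x []) y [])]) []]) []

-- ===== PORT B =====
def get_pareto_relation_alt (alternatives_ratings_by_criteria : List (List Int)) : List (List Int) :=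
  alternatives_ratings_by_criteria.map (fun rx =>
    alternatives_ratings_by_criteria.map (fun ry =>
      if (rx.zip ry).all (fun p => p.2 ≤ p.1) then 1 else 0))

-- ===== PRECONDITION & SPEC =====
-- Pre_ excludes ragged inputs (rows of unequal length), on which A raises IndexError in get_sigma.
def Pre_get_pareto_relation (alternatives_ratings_by_criteria : List (List Int)) : Prop :=
  ∀ r ∈ alternatives_ratings_by_criteria, ∀ s ∈ alternatives_ratings_by_criteria, r.length = s.length
instance (alternatives_ratings_by_criteria : List (List Int)) : Decidable (Pre_get_pareto_relation alternatives_ratings_by_criteria) := by unfold Pre_get_pareto_relation; infer_instance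

def pvWitness_get_pareto_relation : List (List Int) := [[1, 2], [3, 0], [2, 2]]

def Spec_get_pareto_relation (alternatives_ratings_by_criteria : List (List Int)) (out : List (List Int)) : Prop := out = get_pareto_relation_alt alternatives_ratings_by_criteria
instance (alternatives_ratings_by_criteria : List (List Int)) (out : List (List Int)) : Decidable (Spec_get_pareto_relation alternatives_ratings_by_criteria out) := by unfold Spec_get_pareto_relation; infer_instance

-- ===== CLAIM (what is proved, stated in full; the proofs are below) =====
def Claim_equal_get_pareto_relation : Prop := ∀ (alternatives_ratings_by_criteria : List (List Int)), Dom_get_pareto_relation alternatives_ratings_by_criteria → Pre_get_pareto_relation alternatives_ratings_by_criteria → Spec_get_pareto_relation alternatives_ratings_by_criteria (get_pareto_relation alternatives_ratings_by_criteria)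

-- ===== LEMMAS AND PROOFS =====

-- '[g(xs[i]) for i in range(len(xs))]' = 'xs.map g'
theorem pvMapIdx {α β : Type} (xs : List α) (d : α) (g : α → β) :
    (PySem.List.pyRange 0 xs.length 1).map (fun i => g (PySem.List.pyGetD xs i d)) =
      xs.map g := by
  have h : (fun i => g (PySem.List.pyGetD xs i d)) =
      g ∘ (fun i => PySem.List.pyGetD xs i d) := rfl
  rw [h, ← List.map_map, PySem.List.map_pyGetD_pyRange_zero']

def pvSgn (p : Int × Int) : Int :=
  if p.1 - p.2 > 0 then 1 else if p.1 - p.2 < 0 then -1 else 0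

theorem pvGetSigmaEq (x y : List Int) (h : x.length = y.length) :
    get_sigma x y = (x.zip y).map pvSgn := by
  unfold get_sigma
  have hb : ∀ (sigma : List Int) (i : Int),
      (let delta_i := PySem.List.pyGetD x i 0 - PySem.List.pyGetD y i 0
       if delta_i > 0 then sigma ++ [1]
       else if delta_i < 0 then sigma ++ [-1]
       else sigma ++ [0]) =
      sigma ++ [pvSgn (PySem.List.pyGetD x i 0, PySem.List.pyGetD y i 0)] := by
    intro sigma i
    simp only [pvSgn]
    split_ifs <;> rfl
  simp only [hb]
  rw [PySem.List.foldl_append_singleton_eq_map, List.nil_append]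
  apply List.ext_getElem
  · simp [PySem.List.length_pyRange_one, List.length_zip, h]
  · intro k hk1 hk2
    have hkx : k < x.length := by
      simpa [PySem.List.length_pyRange_one] using hk1
    have hky : k < y.length := h ▸ hkx
    simp [PySem.List.getElem_pyRange_one, PySem.List.pyGetD_natCast,
      List.getD_eq_getElem?_getD, List.getElem?_eq_getElem hkx,
      List.getElem?_eq_getElem hky, List.getElem_zip]

theorem pvInnerScanEq (l : List (Int × Int)) :
    pvInnerScan (l.map pvSgn) = (if l.all (fun p => p.2 ≤ p.1) then 1 else 0) := by
  induction l with
  | nil => simp [pvInnerScan]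
  | cons p rest ih =>
    simp only [List.map_cons, pvInnerScan, List.all_cons]
    by_cases hp : p.2 ≤ p.1
    · have hs : ¬ pvSgn p < 0 := by
        simp only [pvSgn]; split_ifs <;> omega
      simp only [if_neg hs, ih, decide_eq_true hp, Bool.true_and]
    · have hs : pvSgn p < 0 := by
        simp only [pvSgn]; split_ifs <;> omega
      simp [hs, hp]

theorem pvSigmaMatrixEq (alts : List (List Int)) :
    get_sigma_matrix alts = alts.map (fun rx => alts.map (fun ry => get_sigma rx ry)) := by
  unfold get_sigma_matrix
  simp only [PySem.List.foldl_append_singleton_eq_map, List.nil_append]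
  rw [pvMapIdx alts [] (fun rx => (PySem.List.pyRange 0 alts.length 1).map
    (fun y => get_sigma rx (PySem.List.pyGetD alts y [])))]
  apply List.map_congr_left
  intro rx _
  exact pvMapIdx alts [] (fun ry => get_sigma rx ry)

theorem pvParetoEqA (alts : List (List Int)) :
    get_pareto_relation alts =
      alts.map (fun rx => alts.map (fun ry => pvInnerScan (get_sigma rx ry))) := by
  unfold get_pareto_relation
  rw [pvSigmaMatrixEq]
  simp only [PySem.List.foldl_append_singleton_eq_map, List.nil_append]
  have hlen : alts.length = (alts.map (fun rx => alts.map (fun ry => get_sigma rx ry))).length := by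
    simp
  rw [hlen]
  rw [pvMapIdx (alts.map (fun rx => alts.map (fun ry => get_sigma rx ry))) []
    (fun row => (PySem.List.pyRange 0 ((alts.map (fun rx => alts.map (fun ry => get_sigma rx ry))).length : Int) 1).map
      (fun y => pvInnerScan (PySem.List.pyGetD row y [])))]
  rw [List.map_map]
  apply List.map_congr_left
  intro rx _
  show (PySem.List.pyRange 0 ((alts.map (fun rx => alts.map (fun ry => get_sigma rx ry))).length : Int) 1).map
      (fun y => pvInnerScan (PySem.List.pyGetD (alts.map (fun ry => get_sigma rx ry)) y [])) = _
  rw [show ((alts.map (fun rx => alts.map (fun ry => get_sigma rx ry))).length : Int)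
        = ((alts.map (fun ry => get_sigma rx ry)).length : Int) by simp]
  rw [pvMapIdx (alts.map (fun ry => get_sigma rx ry)) [] pvInnerScan, List.map_map]
  rfl

-- ===== VERDICT (by name: the statement is the Claim_ definition above) =====
theorem get_pareto_relation_spec : Claim_equal_get_pareto_relation := by
  intro alts _ hpre
  unfold Spec_get_pareto_relation get_pareto_relation_alt
  rw [pvParetoEqA]
  apply List.map_congr_left
  intro rx hrx
  apply List.map_congr_left
  intro ry hry
  rw [pvGetSigmaEq rx ry (hpre rx hrx ry hry), pvInnerScanEq]
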